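-- pv_equiv track=rewrite | github.com/PhamDinhDuy-2508/Projecy_PY | APP FEM(PY)/Hello.py | __tokenexponentia
-- ===== SOURCE A (Python) =====
-- def __tokenexponentia(s) :
--      _char = []
--      while(s) :
--         if s[0] in "**":
--             number = s[0]
--             s = s[1:]
--             while(s  and  s[0] in "**") :
--                 number += s[0]
--                 s = s[1:]
--             _char.append(number)
--             if s :
--                 _char.append(s[0])
--                 s = s[1:]
--         else :
--             _char.append(s[0])
--             s = s[1:]
--      return _char
-- ===== SOURCE B (Python) =====
-- def __tokenexponentia(s):
--     out = []
--     i = 0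
--     n = len(s)
--     while i < n:
--         if s[i] == '*':
--             j = i
--             while j < n and s[j] == '*':
--                 j += 1
--             out.append(s[i:j])
--             i = j
--         else:
--             out.append(s[i])
--             i += 1
--     return out
-- ===== Notes on version B (the rewrite author's own statement) =====
-- stated objective: faster
-- what changed: Replaces A's repeated s = s[1:] slicing (quadratic copying) with a single index-pointer scan that groups each '*' run via a j pointer and one slice per run.
import Mathlib
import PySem

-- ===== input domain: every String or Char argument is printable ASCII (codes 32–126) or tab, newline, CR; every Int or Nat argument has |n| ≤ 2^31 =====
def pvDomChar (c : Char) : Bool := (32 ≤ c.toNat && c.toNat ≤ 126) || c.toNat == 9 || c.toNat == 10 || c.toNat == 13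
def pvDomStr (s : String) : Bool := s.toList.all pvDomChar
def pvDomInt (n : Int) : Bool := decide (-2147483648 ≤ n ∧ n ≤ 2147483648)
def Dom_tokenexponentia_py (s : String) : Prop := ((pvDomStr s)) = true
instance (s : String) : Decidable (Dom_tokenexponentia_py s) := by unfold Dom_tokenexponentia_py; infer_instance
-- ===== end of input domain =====

-- B replaces A's repeated `s = s[1:]` slicing with a single linear index scan (faster).

-- ===== PORT A =====
-- inner while of A: `while s and s[0] in "**": number += s[0]; s = s[1:]`
-- (a string is its list of chars; `c in "**"` on a single char is `c = '*'`)
def tokAStars (number : List Char) (s : List Char) : List Char × List Char :=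
  match s with
  | [] => (number, [])
  | c :: rest => if c = '*' then tokAStars (number ++ [c]) rest else (number, c :: rest)

theorem tokAStars_snd_len (number s : List Char) : (tokAStars number s).2.length ≤ s.length := by
  induction s generalizing number with
  | nil => simp [tokAStars]
  | cons c rest ih =>
    simp only [tokAStars]
    split
    · exact le_trans (ih _) (Nat.le_succ _)
    · simp

-- outer while of A, recursing on the remaining suffix exactly as A reassigns `s`
def tokA (s : List Char) : List String :=
  match s with
  | [] => []
  | c :: rest =>
    if c = '*' then
      match h : tokAStars [c] rest with
      | (number, []) => [String.ofList number]
      | (number, d :: rest'') => String.ofList number :: String.ofList [d] :: tokA rest''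
    else String.ofList [c] :: tokA rest
termination_by s.length
decreasing_by
  · have hlen := tokAStars_snd_len [c] rest
    rw [h] at hlen
    simp at hlen ⊢
    omega
  · simp

def tokenexponentia_py (s : String) : List String := tokA s.toList

-- ===== PORT B =====
-- Source B: index pointer i; a '*' run found by advancing j, emitted as the slice s[i:j]
-- (over the char list: the run is the takeWhile prefix, i := j is the dropWhile suffix)
def tokB (s : List Char) : List String :=
  match s with
  | [] => []
  | c :: rest =>
    if c = '*' then
      String.ofList (c :: rest.takeWhile (· = '*')) :: tokB (rest.dropWhile (· = '*'))
    else String.ofList [c] :: tokB rest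
termination_by s.length
decreasing_by
  · have := List.length_dropWhile_le (p := fun c => decide (c = '*')) rest
    simp at this ⊢
    omega
  · simp

def tokenexponentia_py_alt (s : String) : List String := tokB s.toList

-- ===== PRECONDITION & SPEC =====
def Spec_tokenexponentia_py (s : String) (out : List String) : Prop := out = tokenexponentia_py_alt s
instance (s : String) (out : List String) : Decidable (Spec_tokenexponentia_py s out) := by unfold Spec_tokenexponentia_py; infer_instance

-- ===== CLAIM (what is proved, stated in full; the proofs are below) =====
def Claim_equal_tokenexponentia_py : Prop := ∀ (s : String), Dom_tokenexponentia_py s → Spec_tokenexponentia_py s (tokenexponentia_py s)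

-- ===== LEMMAS AND PROOFS =====

theorem tokAStars_eq (number s : List Char) :
    tokAStars number s = (number ++ s.takeWhile (· = '*'), s.dropWhile (· = '*')) := by
  induction s generalizing number with
  | nil => simp [tokAStars]
  | cons c rest ih =>
    by_cases hc : c = '*'
    · simp [tokAStars, hc, ih]
    · simp [tokAStars, hc]

theorem tokA_eq_tokB (s : List Char) : tokA s = tokB s := by
  induction s using tokA.induct with
  | case1 => simp [tokA, tokB]
  | case2 rest number h =>
    rw [tokAStars_eq] at h
    have hdrop : rest.dropWhile (· = '*') = [] := ((Prod.mk.injEq ..).mp h).2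
    rw [tokA, tokB, if_pos rfl, if_pos rfl]
    split
    · next number' h' =>
      rw [tokAStars_eq] at h'
      have : number' = '*' :: rest.takeWhile (· = '*') := ((Prod.mk.injEq ..).mp h'.symm).1
      rw [this, hdrop]
      simp [tokB]
    · next number' d' rest' h' =>
      rw [tokAStars_eq] at h'
      have : rest.dropWhile (· = '*') = d' :: rest' := ((Prod.mk.injEq ..).mp h').2
      simp [hdrop] at this
  | case3 rest number d rest'' h ih =>
    rw [tokAStars_eq] at h
    have hdrop : rest.dropWhile (· = '*') = d :: rest'' := ((Prod.mk.injEq ..).mp h).2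
    have hd : ¬ (d = '*') := by
      have h0 : 0 < (rest.dropWhile (fun c => decide (c = '*'))).length := by
        simp [hdrop]
      have := List.dropWhile_get_zero_not (p := fun c => decide (c = '*')) rest h0
      simpa [hdrop] using this
    rw [tokA, tokB, if_pos rfl, if_pos rfl]
    split
    · next number' h' =>
      rw [tokAStars_eq] at h'
      have : rest.dropWhile (· = '*') = [] := ((Prod.mk.injEq ..).mp h').2
      rw [hdrop] at this
      exact absurd this (by simp)
    · next number' d' rest' h' =>
      rw [tokAStars_eq] at h'
      obtain ⟨h1, h2⟩ := (Prod.mk.injEq ..).mp h'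
      rw [hdrop] at h2
      obtain ⟨rfl, rfl⟩ := (List.cons.injEq ..).mp h2
      rw [← h1, hdrop, ih, tokB]
      simp [hd]
  | case4 d rest hd ih =>
    rw [tokA, tokB]
    simp [hd, ih]

-- ===== VERDICT (by name: the statement is the Claim_ definition above) =====
theorem tokenexponentia_py_spec : Claim_equal_tokenexponentia_py := by
  intro s _
  unfold Spec_tokenexponentia_py tokenexponentia_py tokenexponentia_py_alt
  exact tokA_eq_tokB s.toList
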